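-- pv_equiv track=rewrite | github.com/giladfuchs/algo-expert-leet-code-soloution | algoexpert/bestSeat.py | bestSeat
-- ===== SOURCE A (Python) =====
-- def bestSeat(seats):
--     temp = 0
--     _max = 0
--     index = -1
--     for i in range(len(seats)):
--         if seats[i]:
--             if temp > _max:
--                 _max = temp
--                 index = i - 1 - temp // 2
--             temp = 0
--         else:
--
--             temp += 1
--
--     return index
-- ===== SOURCE B (Python) =====
-- def bestSeat(seats):
--     occupied = [-1] + [i for i in range(len(seats)) if seats[i]]
--     _max = 0
--     index = -1
--     for j in range(1, len(occupied)):
--         gap = occupied[j] - occupied[j - 1] - 1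
--         if gap > _max:
--             _max = gap
--             index = occupied[j] - 1 - gap // 2
--     return index
-- ===== Notes on version B (the rewrite author's own statement) =====
-- stated objective: alternative
-- what changed: Replaces A's streaming run-length scan (temp counter reset at each occupied seat) with a two-phase decomposition: first collect occupied indices with a -1 sentinel, then scan consecutive boundary pairs computing gap = cur - prev - 1 and the midpoint cur - 1 - gap//2.
import Mathlib
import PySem

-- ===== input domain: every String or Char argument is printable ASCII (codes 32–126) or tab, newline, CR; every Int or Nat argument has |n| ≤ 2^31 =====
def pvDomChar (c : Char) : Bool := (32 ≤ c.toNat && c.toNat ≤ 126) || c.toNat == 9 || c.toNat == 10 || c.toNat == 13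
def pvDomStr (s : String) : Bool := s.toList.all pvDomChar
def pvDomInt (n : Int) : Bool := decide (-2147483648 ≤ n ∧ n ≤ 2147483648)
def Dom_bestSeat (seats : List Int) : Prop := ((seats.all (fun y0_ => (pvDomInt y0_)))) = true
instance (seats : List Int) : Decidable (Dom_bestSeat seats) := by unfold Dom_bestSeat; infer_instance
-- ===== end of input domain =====

-- B: two-phase decomposition (occupied-index list + pairwise gap scan) instead of A's streaming run-length scan; same cost, no behavioural change.
-- ===== PORT A =====
-- the for-loop of A as structural recursion over the list, carrying (i, temp, _max, index)
def bestSeatGo : List Int → Int → Int → Int → Int → Int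
  | [], _, _, _, index => index
  | x :: rest, i, temp, mx, index =>
    if x ≠ 0 then
      if temp > mx then bestSeatGo rest (i + 1) 0 temp (i - 1 - PySem.Int.floordiv temp 2)
      else bestSeatGo rest (i + 1) 0 mx index
    else bestSeatGo rest (i + 1) (temp + 1) mx index

def bestSeat (seats : List Int) : Int := bestSeatGo seats 0 0 0 (-1)

-- ===== PORT B =====
-- [i for i in range(len(seats)) if seats[i]]
def occIdx : List Int → Int → List Int
  | [], _ => []
  | x :: rest, i => if x ≠ 0 then i :: occIdx rest (i + 1) else occIdx rest (i + 1)

-- the for-loop over j: consecutive pairs (occupied[j-1], occupied[j]), carrying prev, _max, index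
def pairScan : Int → List Int → Int → Int → Int
  | _, [], _, index => index
  | prev, cur :: rest, mx, index =>
    if cur - prev - 1 > mx then
      pairScan cur rest (cur - prev - 1) (cur - 1 - PySem.Int.floordiv (cur - prev - 1) 2)
    else pairScan cur rest mx index

def bestSeat_alt (seats : List Int) : Int := pairScan (-1) (occIdx seats 0) 0 (-1)

-- ===== PRECONDITION & SPEC =====
def Spec_bestSeat (seats : List Int) (out : Int) : Prop := out = bestSeat_alt seats
instance (seats : List Int) (out : Int) : Decidable (Spec_bestSeat seats out) := by unfold Spec_bestSeat; infer_instance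

-- ===== CLAIM (what is proved, stated in full; the proofs are below) =====
def Claim_equal_bestSeat : Prop := ∀ (seats : List Int), Dom_bestSeat seats → Spec_bestSeat seats (bestSeat seats)

-- ===== LEMMAS AND PROOFS =====

-- ===== VERDICT (by name: the statement is the Claim_ definition above) =====
-- invariant: prev = i - temp - 1 (temp = length of the current empty run ending just before index i)
theorem go_eq_pairScan : ∀ (rest : List Int) (i temp mx index : Int),
    bestSeatGo rest i temp mx index = pairScan (i - temp - 1) (occIdx rest i) mx index := by
  intro rest
  induction rest with
  | nil => intro _ _ _ _; rfl
  | cons x rest ih =>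
    intro i temp mx index
    by_cases hx : x ≠ 0
    · simp only [bestSeatGo, occIdx, if_pos hx, pairScan]
      have hgap : i - (i - temp - 1) - 1 = temp := by ring
      rw [hgap]
      by_cases ht : temp > mx
      · rw [if_pos ht, if_pos ht, ih]
        norm_num
      · rw [if_neg ht, if_neg ht, ih]
        norm_num
    · simp only [bestSeatGo, occIdx, if_neg hx]
      rw [ih]
      norm_num

theorem bestSeat_spec : Claim_equal_bestSeat := by
  intro seats _
  unfold Spec_bestSeat bestSeat bestSeat_alt
  have h := go_eq_pairScan seats 0 0 0 (-1)
  simpa using h
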